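-- pv_equiv track=rewrite | github.com/depixusgenome/trackanalysis | src/data/tracksdict.py | _leastcommonkeys
-- ===== SOURCE A (Python) =====
-- from typing             import (KeysView, List, Dict, Any, Iterator, Tuple,
--                                 TypeVar, Union, Set, Optional, Pattern, Sequence,
--                                 Callable, cast)
--
-- def _leastcommonkeys(itr):
--     info   = dict(itr)
--     if len(info) == 0:
--         return {}
--     if len(info) == 1:
--         return info
--
--     keys   = {i: i.split('_') for i in info.keys()}
--     common = None
--     for i in keys.values():
--         common = set(i) if common is None else set(i) & cast(set, common)
--
--     if common:
--         keys = {i:'_'.join(k for k in j if k not in common) for i, j in keys.items()}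
--     else:
--         keys = {i:'_'.join(k for k in j) for i, j in keys.items()}
--
--     if '' in keys.values():
--         keys[next(i for i, j in keys.items() if j == '')] = 'ref'
--     return {keys[i]: j for i, j in info.items()}
-- ===== SOURCE B (Python) =====
-- def _leastcommonkeys(itr):
--     info = dict(itr)
--     n = len(info)
--     if n == 0:
--         return {}
--     if n == 1:
--         return info
--
--     tokens = {i: i.split('_') for i in info}
--     counts = {}
--     for toks in tokens.values():
--         for t in dict.fromkeys(toks):
--             counts[t] = counts.get(t, 0) + 1
--     common = {t for t, c in counts.items() if c == n}
--
--     out = {}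
--     used_ref = False
--     for key, value in info.items():
--         new = '_'.join(t for t in tokens[key] if t not in common)
--         if new == '' and not used_ref:
--             new = 'ref'
--             used_ref = True
--         out[new] = value
--     return out
-- ===== Notes on version B (the rewrite author's own statement) =====
-- stated objective: alternative
-- what changed: Replaces the running set-intersection fold and the post-hoc keys-dict rewrite/rename with a token-frequency dict thresholded at len(info) for the common set, and builds the output dict in a single pass that renames the first empty key to 'ref' via a flag instead of next(...) over a rebuilt dict.
import Mathlib
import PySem

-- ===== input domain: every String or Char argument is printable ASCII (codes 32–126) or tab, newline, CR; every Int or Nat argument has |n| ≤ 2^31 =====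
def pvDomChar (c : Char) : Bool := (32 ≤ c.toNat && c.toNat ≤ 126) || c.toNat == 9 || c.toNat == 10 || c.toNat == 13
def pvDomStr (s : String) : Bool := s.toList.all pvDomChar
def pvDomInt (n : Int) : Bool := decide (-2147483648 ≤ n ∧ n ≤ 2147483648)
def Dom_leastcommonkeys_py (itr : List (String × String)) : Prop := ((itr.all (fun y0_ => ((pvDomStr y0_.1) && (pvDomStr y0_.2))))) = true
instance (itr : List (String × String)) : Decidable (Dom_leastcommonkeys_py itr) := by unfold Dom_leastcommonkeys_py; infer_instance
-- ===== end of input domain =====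

-- B replaces A's running set-intersection and post-hoc dict rewrite/rename by a token-frequency
-- threshold and a single flagged output pass (objective: alternative; same cost).

-- ===== PORT A =====
-- literal transliteration of _leastcommonkeys; `keys[i]` in the final dict comprehension is
-- ported as (get? _).getD "" — the key is always present, so the default is never used.
def leastcommonkeys_py (itr : List (String × String)) : List (String × String) :=
  let info := PySem.Dict.ofList itr
  if info.size = 0 then [] else
  if info.size = 1 then info.items else
  let keys : PySem.Dict String (List String) :=
    info.keys.foldl (fun d i => d.insert i ((PySem.Str.split? i "_").getD [])) PySem.Dict.empty
  let common : Option (PySem.Set String) :=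
    keys.values.foldl (fun c i => match c with
      | none => some (PySem.Set.ofList i)
      | some s => some (PySem.Set.inter (PySem.Set.ofList i) s)) none
  let keys2 : PySem.Dict String String :=
    match common with
    | some s =>
        if s.isEmpty then
          keys.items.foldl (fun d p => d.insert p.1 (PySem.Str.join "_" p.2)) PySem.Dict.empty
        else
          keys.items.foldl (fun d p =>
            d.insert p.1 (PySem.Str.join "_" (p.2.filter (fun k => !(PySem.Set.contains s k)))))
            PySem.Dict.empty
    | none =>
        keys.items.foldl (fun d p => d.insert p.1 (PySem.Str.join "_" p.2)) PySem.Dict.empty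
  let keys3 : PySem.Dict String String :=
    if keys2.values.contains "" then
      match keys2.items.find? (fun p => p.2 == "") with
      | some p => keys2.insert p.1 "ref"
      | none => keys2
    else keys2
  (info.items.foldl (fun d p => d.insert ((keys3.get? p.1).getD "") p.2) PySem.Dict.empty).items

-- ===== PORT B =====
-- literal transliteration of Source B; `tokens[key]` is ported as (get? _).getD [] — the key is
-- always present, so the default is never used.
def leastcommonkeys_py_alt (itr : List (String × String)) : List (String × String) :=
  let info := PySem.Dict.ofList itr
  let n := info.size
  if n = 0 then [] else
  if n = 1 then info.items else
  let tokens : PySem.Dict String (List String) :=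
    info.keys.foldl (fun d i => d.insert i ((PySem.Str.split? i "_").getD [])) PySem.Dict.empty
  let counts : PySem.Dict String Int :=
    tokens.values.foldl (fun d toks =>
      (PySem.List.dedup toks).foldl (fun d t => d.insert t (d.getD t 0 + 1)) d)
      PySem.Dict.empty
  let common : PySem.Set String :=
    PySem.Set.ofList ((counts.items.filter (fun p => p.2 == (n : Int))).map (·.1))
  let out :=
    info.items.foldl (fun st p =>
      let nk := PySem.Str.join "_"
        (((tokens.get? p.1).getD []).filter (fun t => !(PySem.Set.contains common t)))
      if nk = "" ∧ st.2 = false then (st.1.insert "ref" p.2, true)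
      else (st.1.insert nk p.2, st.2)) ((PySem.Dict.empty : PySem.Dict String String), false)
  out.1.items

-- ===== PRECONDITION & SPEC =====
def Spec_leastcommonkeys_py (itr : List (String × String)) (out : List (String × String)) : Prop := out = leastcommonkeys_py_alt itr
instance (itr : List (String × String)) (out : List (String × String)) : Decidable (Spec_leastcommonkeys_py itr out) := by unfold Spec_leastcommonkeys_py; infer_instance

-- ===== CLAIM (what is proved, stated in full; the proofs are below) =====
def Claim_equal_leastcommonkeys_py : Prop := ∀ (itr : List (String × String)), Dom_leastcommonkeys_py itr → Spec_leastcommonkeys_py itr (leastcommonkeys_py itr)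

-- ===== LEMMAS AND PROOFS =====



theorem pv_first_split {α : Type} (q : α → Bool) : ∀ (L : List α), (∃ x ∈ L, q x = true) →
    ∃ L1 x L2, L = L1 ++ x :: L2 ∧ q x = true ∧ ∀ y ∈ L1, q y = false := by
  intro L
  induction L with
  | nil => simp
  | cons a L ih =>
    intro h
    by_cases ha : q a = true
    · exact ⟨[], a, L, by simp, ha, by simp⟩
    · obtain ⟨x, hx, hqx⟩ := h
      rcases List.mem_cons.mp hx with hx | hx
      · exact absurd (hx ▸ hqx) ha
      · obtain ⟨L1, x, L2, hL, hq, hcl⟩ := ih ⟨x, hx, hqx⟩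
        exact ⟨a :: L1, x, L2, by simp [hL], hq, by
          intro y hy
          rcases List.mem_cons.mp hy with h | h
          · simpa [h] using ha
          · exact hcl y h⟩

theorem pv_find?_split {α : Type} (q : α → Bool) (L1 : List α) (x : α) (L2 : List α)
    (h1 : ∀ y ∈ L1, q y = false) (hx : q x = true) :
    List.find? q (L1 ++ x :: L2) = some x := by
  induction L1 with
  | nil => simpa using List.find?_cons_of_pos hx
  | cons a L1 ih =>
    rw [List.cons_append, List.find?_cons_of_neg (by simpa using h1 a (by simp))]
    exact ih (fun y hy => h1 y (by simp [hy]))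

theorem pv_optfold (vs : List (List String)) (s0 : PySem.Set String) :
    vs.foldl (fun c i => match c with
      | none => some (PySem.Set.ofList i)
      | some s => some (PySem.Set.inter (PySem.Set.ofList i) s)) (some s0)
    = some (vs.foldl (fun s i => PySem.Set.inter (PySem.Set.ofList i) s) s0) := by
  induction vs generalizing s0 with
  | nil => rfl
  | cons v vs ih => simpa using ih (PySem.Set.inter (PySem.Set.ofList v) s0)

theorem pv_mem_interfold (vs : List (List String)) (s0 : PySem.Set String) (t : String) :
    t ∈ vs.foldl (fun s i => PySem.Set.inter (PySem.Set.ofList i) s) s0 ↔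
      t ∈ s0 ∧ ∀ v ∈ vs, t ∈ v := by
  induction vs generalizing s0 with
  | nil => simp
  | cons v vs ih =>
    simp only [List.foldl_cons, ih, PySem.Set.mem_inter, PySem.Set.mem_ofList, List.mem_cons]
    aesop

theorem pv_counts_getD (vs : List (List String)) (d : PySem.Dict String Int) (t : String) :
    (vs.foldl (fun d toks =>
        (PySem.List.dedup toks).foldl (fun d t => d.insert t (d.getD t 0 + 1)) d) d).getD t 0
    = d.getD t 0 + (vs.countP (fun v => decide (t ∈ v)) : Int) := by
  induction vs generalizing d with
  | nil => simp
  | cons v vs ih =>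
    rw [List.foldl_cons, ih, PySem.Dict.getD_foldl_insert_add_one]
    have hc : (PySem.List.dedup v).count t = if t ∈ v then 1 else 0 := by
      by_cases h : t ∈ v
      · rw [if_pos h]
        exact List.count_eq_one_of_mem (PySem.List.nodup_dedup v) ((PySem.List.mem_dedup v t).mpr h)
      · rw [if_neg h]
        exact List.count_eq_zero.mpr (fun hc => h ((PySem.List.mem_dedup v t).mp hc))
    rw [hc, List.countP_cons]
    by_cases h : t ∈ v
    · simp [h]; ring
    · simp [h]

theorem pv_counts_keys (vs : List (List String)) (d : PySem.Dict String Int) (t : String) :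
    t ∈ (vs.foldl (fun d toks =>
        (PySem.List.dedup toks).foldl (fun d t => d.insert t (d.getD t 0 + 1)) d) d).keys ↔
      t ∈ d.keys ∨ ∃ v ∈ vs, t ∈ v := by
  induction vs generalizing d with
  | nil => simp
  | cons v vs ih =>
    rw [List.foldl_cons, ih, PySem.Dict.keys_foldl_insert]
    simp only [PySem.Set.mem_update, PySem.List.mem_dedup, List.mem_cons]
    constructor
    · rintro (⟨h | h⟩ | ⟨w, hw, hm⟩)
      · exact Or.inl h
      · exact Or.inr ⟨v, Or.inl rfl, h⟩
      · exact Or.inr ⟨w, Or.inr hw, hm⟩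
    · rintro (h | ⟨w, hw | hw, hm⟩)
      · exact Or.inl (Or.inl h)
      · exact Or.inl (Or.inr (hw ▸ hm))
      · exact Or.inr ⟨w, hw, hm⟩

theorem pv_counts_nodup (vs : List (List String)) (d : PySem.Dict String Int)
    (h : d.keys.Nodup) :
    (vs.foldl (fun d toks =>
        (PySem.List.dedup toks).foldl (fun d t => d.insert t (d.getD t 0 + 1)) d) d).keys.Nodup := by
  induction vs generalizing d with
  | nil => exact h
  | cons v vs ih =>
    exact ih _ (PySem.Dict.nodup_keys_foldl_insert _ _ _ h)

theorem pv_flagfold_true (F : String → String) (L : List (String × String))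
    (d : PySem.Dict String String) :
    L.foldl (fun st p => if F p.1 = "" ∧ st.2 = false then (st.1.insert "ref" p.2, true)
      else (st.1.insert (F p.1) p.2, st.2)) (d, true)
    = (L.foldl (fun d p => d.insert (F p.1) p.2) d, true) := by
  induction L generalizing d with
  | nil => rfl
  | cons p L ih => simpa using ih (d.insert (F p.1) p.2)

theorem pv_flagfold_false (F : String → String) (L : List (String × String))
    (d : PySem.Dict String String) (h : ∀ p ∈ L, ¬ F p.1 = "") :
    L.foldl (fun st p => if F p.1 = "" ∧ st.2 = false then (st.1.insert "ref" p.2, true)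
      else (st.1.insert (F p.1) p.2, st.2)) (d, false)
    = (L.foldl (fun d p => d.insert (F p.1) p.2) d, false) := by
  induction L generalizing d with
  | nil => rfl
  | cons p L ih =>
    rw [List.foldl_cons, if_neg (by simp [h p (by simp)]), List.foldl_cons]
    exact ih _ (fun q hq => h q (by simp [hq]))


def pvSplit (i : String) : List String := (PySem.Str.split? i "_").getD []


theorem pv_tail (info : PySem.Dict String String) (hnd : info.keys.Nodup)
    (F : String → String) (K2 : PySem.Dict String String)
    (hK2items : K2.items = info.keys.map (fun i => (i, F i))) :
    (let keys3 : PySem.Dict String String :=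
      if K2.values.contains "" then
        match K2.items.find? (fun p => p.2 == "") with
        | some p => K2.insert p.1 "ref"
        | none => K2
      else K2
    (info.items.foldl (fun d p => d.insert ((keys3.get? p.1).getD "") p.2) PySem.Dict.empty).items)
    =
    (info.items.foldl (fun st p =>
        if F p.1 = "" ∧ st.2 = false then (st.1.insert "ref" p.2, true)
        else (st.1.insert (F p.1) p.2, st.2))
      ((PySem.Dict.empty : PySem.Dict String String), false)).1.items := by
  dsimp only
  have hkeys : info.keys = info.items.map Prod.fst := rfl
  have hfstcomp : (Prod.fst ∘ fun i : String => (i, F i)) = id := rfl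
  have hK2keys : K2.keys = info.keys := by
    show K2.items.map Prod.fst = info.keys
    simp [hK2items, hfstcomp]
  have hK2nd : K2.keys.Nodup := by rw [hK2keys]; exact hnd
  have hK2get : ∀ i ∈ info.keys, K2.get? i = some (F i) := by
    intro i hi
    exact PySem.Dict.get?_of_mem_items _ (by rw [hK2items]; exact List.mem_map_of_mem hi) hK2nd
  have hK2vals : K2.values = info.keys.map F := by
    show K2.items.map Prod.snd = _
    simp [hK2items]
  by_cases hex : ∃ p ∈ info.items, F p.1 = ""
  · -- some key strips to ""
    obtain ⟨L1, p0, L2, hsplit, hq0, hclean⟩ :=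
      pv_first_split (fun p => F p.1 == "") info.items
        (by obtain ⟨p, hp, he⟩ := hex; exact ⟨p, hp, by simpa using he⟩)
    have hq0' : F p0.1 = "" := by simpa using hq0
    have hks_split : info.keys = L1.map Prod.fst ++ p0.1 :: L2.map Prod.fst := by
      rw [hkeys, hsplit]; simp
    have hnd' := hnd
    rw [hks_split] at hnd'
    have hp0L1 : p0.1 ∉ L1.map Prod.fst := by
      intro h
      exact (List.disjoint_of_nodup_append hnd') h (by simp)
    have hp0L2 : p0.1 ∉ L2.map Prod.fst := by
      have := (List.nodup_append.mp hnd').2.1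
      exact (List.nodup_cons.mp this).1
    have hcon : K2.values.contains "" = true := by
      rw [hK2vals, List.contains_iff_mem]
      exact List.mem_map.mpr ⟨p0.1, by rw [hks_split]; simp, hq0'⟩
    have hfind : K2.items.find? (fun p => p.2 == "") = some (p0.1, F p0.1) := by
      rw [hK2items, hks_split]
      simp only [List.map_append, List.map_cons]
      exact pv_find?_split _ _ _ _
        (by
          intro y hy
          obtain ⟨x, hx, rfl⟩ := List.mem_map.mp hy
          obtain ⟨q, hq, rfl⟩ := List.mem_map.mp hx
          simpa using hclean q hq)
        (by simpa using hq0')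
    rw [hcon, hfind]
    rw [if_pos rfl]
    -- A's final fold with keys3 = K2.insert p0.1 "ref"
    have hK3get : ∀ i ∈ info.keys, i ≠ p0.1 →
        (((K2.insert p0.1 "ref").get? i).getD "") = F i := by
      intro i hi hne
      rw [PySem.Dict.get?_insert, if_neg hne, hK2get i hi]
      rfl
    rw [hsplit, List.foldl_append, List.foldl_append, List.foldl_cons, List.foldl_cons]
    -- L1 parts agree
    have hL1 : L1.foldl (fun d p => d.insert (((K2.insert p0.1 "ref").get? p.1).getD "") p.2)
        PySem.Dict.empty = L1.foldl (fun d p => d.insert (F p.1) p.2) PySem.Dict.empty := by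
      apply PySem.List.foldl_congr_mem
      intro d p hp
      rw [hK3get p.1 (by rw [hks_split]; exact List.mem_append_left _ (List.mem_map_of_mem hp))
        (fun h => hp0L1 (h ▸ List.mem_map_of_mem hp))]
    have hL1' : L1.foldl (fun st p =>
        if F p.1 = "" ∧ st.2 = false then (st.1.insert "ref" p.2, true)
        else (st.1.insert (F p.1) p.2, st.2)) ((PySem.Dict.empty : PySem.Dict String String), false)
        = (L1.foldl (fun d p => d.insert (F p.1) p.2) PySem.Dict.empty, false) :=
      pv_flagfold_false F L1 PySem.Dict.empty
        (fun p hp => by simpa using hclean p hp)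
    rw [hL1, hL1']
    -- the p0 step
    have hstep0A : (((K2.insert p0.1 "ref").get? p0.1).getD "") = "ref" := by
      rw [PySem.Dict.get?_insert, if_pos rfl]; rfl
    rw [hstep0A]
    rw [if_pos ⟨hq0', rfl⟩]
    -- L2 parts agree
    rw [pv_flagfold_true]
    apply congrArg
    have : (L2.foldl (fun d p => d.insert (((K2.insert p0.1 "ref").get? p.1).getD "") p.2)
        ((L1.foldl (fun d p => d.insert (F p.1) p.2) PySem.Dict.empty).insert "ref" p0.2)) =
        (L2.foldl (fun d p => d.insert (F p.1) p.2)
        ((L1.foldl (fun d p => d.insert (F p.1) p.2) PySem.Dict.empty).insert "ref" p0.2)) := by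
      apply PySem.List.foldl_congr_mem
      intro d p hp
      rw [hK3get p.1
        (by rw [hks_split]; exact List.mem_append_right _ (List.mem_cons_of_mem _ (List.mem_map_of_mem hp)))
        (fun h => hp0L2 (h ▸ List.mem_map_of_mem hp))]
    rw [this]
  · -- no key strips to ""
    have hnone : ∀ p ∈ info.items, ¬ F p.1 = "" := fun p hp h => hex ⟨p, hp, h⟩
    have hcon : K2.values.contains "" = false := by
      rw [Bool.eq_false_iff]
      intro h
      rw [hK2vals, List.contains_iff_mem] at h
      obtain ⟨i, hi, he⟩ := List.mem_map.mp h
      rw [hkeys] at hi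
      obtain ⟨p, hp, rfl⟩ := List.mem_map.mp hi
      exact hnone p hp he
    rw [hcon]
    rw [if_neg (by simp)]
    have hA : info.items.foldl (fun d p => d.insert ((K2.get? p.1).getD "") p.2)
        PySem.Dict.empty = info.items.foldl (fun d p => d.insert (F p.1) p.2) PySem.Dict.empty := by
      apply PySem.List.foldl_congr_mem
      intro d p hp
      rw [hK2get p.1 (by rw [hkeys]; exact List.mem_map_of_mem hp)]
      rfl
    rw [hA, pv_flagfold_false F info.items PySem.Dict.empty hnone]

theorem pv_core (info : PySem.Dict String String) (hnd : info.keys.Nodup)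
    (h0 : ¬ info.size = 0) :
    (let keys : PySem.Dict String (List String) :=
      info.keys.foldl (fun d i => d.insert i ((PySem.Str.split? i "_").getD [])) PySem.Dict.empty
    let common : Option (PySem.Set String) :=
      keys.values.foldl (fun c i => match c with
        | none => some (PySem.Set.ofList i)
        | some s => some (PySem.Set.inter (PySem.Set.ofList i) s)) none
    let keys2 : PySem.Dict String String :=
      match common with
      | some s =>
          if s.isEmpty then
            keys.items.foldl (fun d p => d.insert p.1 (PySem.Str.join "_" p.2)) PySem.Dict.empty
          else
            keys.items.foldl (fun d p =>
              d.insert p.1 (PySem.Str.join "_" (p.2.filter (fun k => !(PySem.Set.contains s k)))))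
              PySem.Dict.empty
      | none =>
          keys.items.foldl (fun d p => d.insert p.1 (PySem.Str.join "_" p.2)) PySem.Dict.empty
    let keys3 : PySem.Dict String String :=
      if keys2.values.contains "" then
        match keys2.items.find? (fun p => p.2 == "") with
        | some p => keys2.insert p.1 "ref"
        | none => keys2
      else keys2
    (info.items.foldl (fun d p => d.insert ((keys3.get? p.1).getD "") p.2) PySem.Dict.empty).items)
    =
    (let tokens : PySem.Dict String (List String) :=
      info.keys.foldl (fun d i => d.insert i ((PySem.Str.split? i "_").getD [])) PySem.Dict.empty
    let counts : PySem.Dict String Int :=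
      tokens.values.foldl (fun d toks =>
        (PySem.List.dedup toks).foldl (fun d t => d.insert t (d.getD t 0 + 1)) d)
        PySem.Dict.empty
    let common : PySem.Set String :=
      PySem.Set.ofList ((counts.items.filter (fun p => p.2 == (info.size : Int))).map (·.1))
    let out :=
      info.items.foldl (fun st p =>
        let nk := PySem.Str.join "_"
          (((tokens.get? p.1).getD []).filter (fun t => !(PySem.Set.contains common t)))
        if nk = "" ∧ st.2 = false then (st.1.insert "ref" p.2, true)
        else (st.1.insert nk p.2, st.2)) ((PySem.Dict.empty : PySem.Dict String String), false)
    out.1.items) := by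
  dsimp only
  -- name the shared tokens dict
  set T : PySem.Dict String (List String) :=
    info.keys.foldl (fun d i => d.insert i ((PySem.Str.split? i "_").getD [])) PySem.Dict.empty
    with hT
  have hkeys : info.keys = info.items.map Prod.fst := rfl
  have hsize : info.size = info.items.length := rfl
  have hTitems : T.items = info.keys.map (fun i => (i, pvSplit i)) := by
    rw [hT]
    have := PySem.Dict.items_foldl_insert_fresh (l := info.keys) (k := fun a => a)
      (v := fun a => (PySem.Str.split? a "_").getD []) (d := PySem.Dict.empty)
      (by simp) (by simpa using hnd)
    simpa [pvSplit] using this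
  have hfstcomp : (Prod.fst ∘ fun i : String => (i, pvSplit i)) = id := rfl
  have hTkeys : T.keys = info.keys := by
    show T.items.map Prod.fst = info.keys
    simp [hTitems, hfstcomp]
  have hTvals : T.values = info.keys.map pvSplit := by
    show T.items.map Prod.snd = _
    simp [hTitems, Function.comp]
  have hTget : ∀ i ∈ info.keys, T.get? i = some (pvSplit i) := by
    intro i hi
    exact PySem.Dict.get?_of_mem_items _ (by rw [hTitems]; exact List.mem_map_of_mem hi)
      (by rw [hTkeys]; exact hnd)
  -- info.keys is nonempty (size ≥ 1)
  obtain ⟨k0, krest, hks⟩ : ∃ k0 krest, info.keys = k0 :: krest := by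
    cases hk : info.keys with
    | nil =>
      exfalso; apply h0
      rw [hkeys] at hk
      simp [hsize, List.map_eq_nil_iff.mp hk]
    | cons a l => exact ⟨a, l, rfl⟩
  -- A's common set
  set sA : PySem.Set String :=
    (krest.map pvSplit).foldl (fun s i => PySem.Set.inter (PySem.Set.ofList i) s)
      (PySem.Set.ofList (pvSplit k0)) with hsA
  have hCommonA :
      T.values.foldl (fun c i => match c with
        | none => some (PySem.Set.ofList i)
        | some s => some (PySem.Set.inter (PySem.Set.ofList i) s)) none = some sA := by
    rw [hTvals, hks, List.map_cons, List.foldl_cons]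
    exact pv_optfold _ _
  have hmemA : ∀ t, t ∈ sA ↔ ∀ v ∈ (info.keys.map pvSplit), t ∈ v := by
    intro t
    rw [hsA, pv_mem_interfold, hks]
    simp only [List.map_cons, List.mem_cons, PySem.Set.mem_ofList]
    constructor
    · rintro ⟨h1, h2⟩ v (rfl | hv)
      · exact h1
      · exact h2 v hv
    · intro h
      exact ⟨h _ (Or.inl rfl), fun v hv => h v (Or.inr hv)⟩
  -- B's counts dict and common set
  set counts : PySem.Dict String Int :=
    T.values.foldl (fun d toks =>
      (PySem.List.dedup toks).foldl (fun d t => d.insert t (d.getD t 0 + 1)) d)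
      PySem.Dict.empty with hcounts
  have hcountsnd : counts.keys.Nodup := by
    rw [hcounts]; exact pv_counts_nodup _ _ (by simp)
  set cB : PySem.Set String :=
    PySem.Set.ofList ((counts.items.filter (fun p => p.2 == (info.size : Int))).map (·.1))
    with hcB
  have hmemB : ∀ t, t ∈ cB ↔ ∀ v ∈ (info.keys.map pvSplit), t ∈ v := by
    intro t
    have hlen : info.size = (info.keys.map pvSplit).length := by
      simp [hsize, hkeys]
    have hgetD : counts.getD t 0 = ((info.keys.map pvSplit).countP (fun v => decide (t ∈ v)) : Int) := by
      rw [hcounts, hTvals, pv_counts_getD]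
      simp
    have hkeysmem : t ∈ counts.keys ↔ ∃ v ∈ (info.keys.map pvSplit), t ∈ v := by
      rw [hcounts, hTvals, pv_counts_keys]
      simp
    rw [hcB, PySem.Set.mem_ofList]
    constructor
    · intro hmem
      obtain ⟨p, hpf, hfst⟩ := List.mem_map.mp hmem
      obtain ⟨hp, hpn⟩ := List.mem_filter.mp hpf
      obtain ⟨pk, pv⟩ := p
      cases hfst
      have hget : counts.getD pk 0 = pv := PySem.Dict.getD_of_mem_items counts hp hcountsnd 0
      have hcnt : ((info.keys.map pvSplit).countP (fun v => decide (pk ∈ v)) : Int)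
          = ((info.keys.map pvSplit).length : Int) := by
        rw [← hgetD, hget, ← hlen]
        exact_mod_cast (beq_iff_eq.mp hpn)
      intro v hv
      have := List.countP_eq_length.mp (by exact_mod_cast hcnt) v hv
      simpa using this
    · intro h
      have hcount : (info.keys.map pvSplit).countP (fun v => decide (t ∈ v))
          = (info.keys.map pvSplit).length :=
        List.countP_eq_length.mpr (fun v hv => by simpa using h v hv)
      have hkm : t ∈ counts.keys := by
        rw [hkeysmem]
        exact ⟨pvSplit k0, by simp [hks], h _ (by simp [hks])⟩
      refine List.mem_map.mpr ⟨(t, counts.getD t 0), List.mem_filter.mpr ⟨?_, ?_⟩, rfl⟩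
      · rw [PySem.Dict.items_eq_map_keys counts hcountsnd 0]
        exact List.mem_map_of_mem hkm
      · rw [hgetD, hcount, hlen]
        simp
  have hAB : ∀ t, t ∈ sA ↔ t ∈ cB := fun t => by rw [hmemA, hmemB]
  have hconAB : ∀ k, PySem.Set.contains sA k = PySem.Set.contains cB k := fun k =>
    Bool.eq_iff_iff.mpr (by rw [PySem.Set.contains_iff, PySem.Set.contains_iff, hAB k])
  set F : String → String :=
    fun i => PySem.Str.join "_" ((pvSplit i).filter (fun t => !(PySem.Set.contains cB t))) with hF
  have hfuneq : (fun k => !PySem.Set.contains sA k) = (fun k => !PySem.Set.contains cB k) :=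
    funext fun k => by rw [hconAB]
  have hStrip : T.items.foldl (fun d p =>
      d.insert p.1 (PySem.Str.join "_" (p.2.filter (fun k => !(PySem.Set.contains sA k)))))
      PySem.Dict.empty
      = T.items.foldl (fun d p => d.insert p.1 (F p.1)) PySem.Dict.empty := by
    apply PySem.List.foldl_congr_mem
    intro d p hp
    rw [hTitems] at hp
    obtain ⟨i, hi, rfl⟩ := List.mem_map.mp hp
    rw [hfuneq]
  have hK2items : (T.items.foldl (fun d p => d.insert p.1 (F p.1)) PySem.Dict.empty).items
      = info.keys.map (fun i => (i, F i)) := by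
    have := PySem.Dict.items_foldl_insert_fresh (l := T.items) (k := fun p => p.1)
      (v := fun p => F p.1) (d := PySem.Dict.empty)
      (by simp)
      (by rw [hTitems]; simpa [List.map_map, hfstcomp] using hnd)
    rw [this, hTitems]
    have hcomp : ((fun a : String × List String => (a.1, F a.1)) ∘ fun i : String => (i, pvSplit i))
        = fun i : String => (i, F i) := rfl
    simp [List.map_map, hcomp]
    rfl
  have hBfold : info.items.foldl (fun st p =>
      if PySem.Str.join "_" (((T.get? p.1).getD []).filter (fun t => !(PySem.Set.contains cB t))) = "" ∧ st.2 = false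
      then (st.1.insert "ref" p.2, true)
      else (st.1.insert (PySem.Str.join "_" (((T.get? p.1).getD []).filter (fun t => !(PySem.Set.contains cB t)))) p.2, st.2))
      ((PySem.Dict.empty : PySem.Dict String String), false)
    = info.items.foldl (fun st p =>
      if F p.1 = "" ∧ st.2 = false then (st.1.insert "ref" p.2, true)
      else (st.1.insert (F p.1) p.2, st.2)) ((PySem.Dict.empty : PySem.Dict String String), false) := by
    apply PySem.List.foldl_congr_mem
    intro st p hp
    have hp1 : p.1 ∈ info.keys := by rw [hkeys]; exact List.mem_map_of_mem hp
    rw [hTget p.1 hp1]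
    rfl
  simp only [hCommonA]
  rw [hBfold]
  by_cases hempty : sA.isEmpty = true
  · have hsAnil : sA = [] := List.isEmpty_iff.mp hempty
    have hnocB : ∀ t, PySem.Set.contains cB t = false := by
      intro t
      rw [Bool.eq_false_iff]
      intro h
      have : t ∈ sA := (hAB t).mpr (PySem.Set.contains_iff cB t |>.mp h)
      rw [hsAnil] at this
      exact absurd this (List.not_mem_nil)
    have hJoin : T.items.foldl (fun d p => d.insert p.1 (PySem.Str.join "_" p.2))
        PySem.Dict.empty
        = T.items.foldl (fun d p => d.insert p.1 (F p.1)) PySem.Dict.empty := by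
      apply PySem.List.foldl_congr_mem
      intro d p hp
      rw [hTitems] at hp
      obtain ⟨i, hi, rfl⟩ := List.mem_map.mp hp
      have hfa : (pvSplit i).filter (fun t => !(PySem.Set.contains cB t)) = pvSplit i :=
        List.filter_eq_self.mpr (fun a _ => by rw [hnocB]; rfl)
      show PySem.Dict.insert d i (PySem.Str.join "_" (pvSplit i)) = PySem.Dict.insert d i (F i)
      rw [hF]
      simp only [hfa]
    rw [if_pos hempty, hJoin]
    exact pv_tail info hnd F _ hK2items
  · rw [if_neg hempty, hStrip]
    exact pv_tail info hnd F _ hK2items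

-- ===== VERDICT (by name: the statement is the Claim_ definition above) =====
theorem leastcommonkeys_py_spec : Claim_equal_leastcommonkeys_py := by
  intro itr _
  unfold Spec_leastcommonkeys_py
  unfold leastcommonkeys_py leastcommonkeys_py_alt
  by_cases h0 : (PySem.Dict.ofList itr).size = 0
  · simp [h0]
  by_cases h1 : (PySem.Dict.ofList itr).size = 1
  · simp [h1]
  simp only [if_neg h0, if_neg h1]
  exact pv_core (PySem.Dict.ofList itr) (PySem.Dict.nodup_keys_ofList itr) h0
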